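-- pv_equiv track=rewrite | github.com/BatmanInGotham2/fa18-hw-ref | hw4.py | alphabet_finder
-- ===== SOURCE A (Python) =====
-- def alphabet_finder(s):
-- 	if s == None or len(s) == 0:
-- 		return None
-- 	alpha = "abcdefghijklmnopqrstuvwxyz"
-- 	str = s.lower()
-- 	strs = []
-- 	for i in range(0, len(s)):
-- 		alpha = "abcdefghijklmnopqrstuvwxyz"
-- 		count = i
-- 		while len(alpha) > 0 and count < len(str):
-- 			if str[count] in alpha:
-- 				alpha = alpha.replace(str[count], "")
-- 			count += 1
-- 		if len(alpha) == 0: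
-- 			strs.append(s[i:count])
-- 	if(len(strs) == 0):
-- 		return None
-- 	mini = 0
-- 	minL = len(strs[0])
-- 	for i in range(0, len(strs)):
-- 		if(len(strs[i]) < minL):
-- 			mini = i
-- 			minL = len(strs[i])
-- 	return strs[mini]
-- ===== SOURCE B (Python) =====
-- def alphabet_finder(s):
--     # O(26*n) one-pass re-implementation: scan backward keeping each letter's
--     # first occurrence index; a full dict gives the minimal window starting at i.
--     if s is None or len(s) == 0:
--         return None
--     t = s.lower()
--     n = len(t)
--     first = {}
--     best = None
--     for i in range(n - 1, -1, -1):
--         c = t[i]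
--         if 'a' <= c <= 'z':
--             first[c] = i
--         if len(first) == 26:
--             e = max(first.values()) + 1
--             cand = (e - i, i)
--             if best is None or cand < best:
--                 best = cand
--     if best is None:
--         return None
--     L, i = best
--     return s[i:i + L]
-- ===== Notes on version B (the rewrite author's own statement) =====
-- stated objective: faster
-- what changed: A rescans the string from every start index with a fresh alphabet checklist (quadratic); B does one backward pass keeping each letter's first occurrence in a dict, deriving the minimal window for every start and the lexicographically best (shortest, then earliest) candidate on the fly.
import Mathlib
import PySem

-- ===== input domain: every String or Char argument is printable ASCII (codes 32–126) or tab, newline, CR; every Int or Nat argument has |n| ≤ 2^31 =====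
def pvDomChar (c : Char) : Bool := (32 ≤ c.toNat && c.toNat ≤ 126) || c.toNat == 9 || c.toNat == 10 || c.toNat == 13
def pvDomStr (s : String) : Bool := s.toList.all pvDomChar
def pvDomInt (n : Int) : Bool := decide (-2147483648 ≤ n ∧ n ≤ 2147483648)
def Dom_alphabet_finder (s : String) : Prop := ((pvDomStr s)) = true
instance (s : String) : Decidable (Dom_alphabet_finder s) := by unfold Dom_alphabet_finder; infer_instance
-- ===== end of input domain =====

-- B replaces A's per-start rescan of the string (a fresh alphabet walk for every i) by one backward
-- pass that keeps each letter's first occurrence in a dict and a running best window (alternative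
-- single-pass algorithm; a timing run reports the measured speed).

-- ===== PORT A =====
def pvLetters : List Char := ['a','b','c','d','e','f','g','h','i','j','k','l','m','n','o','p','q','r','s','t','u','v','w','x','y','z']

-- A's inner while loop; alpha.replace(str[count], "") removes every occurrence = filter
def pvInnerA (t : List Char) (alpha : List Char) (count : Nat) : List Char × Nat :=
  if h : 0 < alpha.length ∧ count < t.length then
    let c := t[count]'h.2
    let alpha' := if c ∈ alpha then alpha.filter (fun x => x ≠ c) else alpha
    pvInnerA t alpha' (count + 1)
  else (alpha, count)
termination_by t.length - count
decreasing_by omega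

def alphabet_finder (s : String) : Option String :=
  let cs := s.toList
  if cs.length = 0 then none
  else
    let str := PySem.Chars.lower cs
    let strs := (PySem.List.pyRange 0 (cs.length : Int) 1).foldl
      (fun (acc : List (List Char)) i =>
        let r := pvInnerA str pvLetters i.toNat
        if r.1.length = 0 then acc ++ [PySem.List.slice cs (some i) (some (r.2 : Int))] else acc) []
    if strs.length = 0 then none
    else
      let r := (PySem.List.pyRange 0 (strs.length : Int) 1).foldl
        (fun (p : Nat × Nat) i =>
          if (PySem.List.pyGetD strs i []).length < p.2 then (i.toNat, (PySem.List.pyGetD strs i []).length) else p)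
        (0, (PySem.List.pyGetD strs 0 []).length)
      some (String.ofList (PySem.List.pyGetD strs (r.1 : Int) []))

-- ===== PORT B =====
-- the body of B's backward loop (first-occurrence dict + running best, Python tuple '<' is lexicographic)
def pvStepB (t : List Char) (st : PySem.Dict Char Int × Option (Int × Int)) (i : Int) :
    PySem.Dict Char Int × Option (Int × Int) :=
  let c := PySem.List.pyGetD t i ' '   -- t[i]; every i of the loop is in range
  let first := if 'a' ≤ c ∧ c ≤ 'z' then st.1.insert c i else st.1
  let best :=
    if first.size = 26 then
      match PySem.List.max? first.values (fun v => v) with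
      | none => st.2  -- unreachable: size = 26 gives a nonempty values list
      | some m =>
        let cand : Int × Int := (m + 1 - i, i)
        match st.2 with
        | none => some cand
        | some b => if cand.1 < b.1 ∨ (cand.1 = b.1 ∧ cand.2 < b.2) then some cand else some b
    else st.2
  (first, best)

def alphabet_finder_alt (s : String) : Option String :=
  let cs := s.toList
  if cs.length = 0 then none
  else
    let t := PySem.Chars.lower cs
    let n := t.length
    let r := (PySem.List.pyRange ((n : Int) - 1) (-1) (-1)).foldl (pvStepB t) (PySem.Dict.empty, none)
    match r.2 with
    | none => none
    | some Li => some (String.ofList (PySem.List.slice cs (some Li.2) (some (Li.2 + Li.1))))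

-- ===== PRECONDITION & SPEC =====
def Spec_alphabet_finder (s : String) (out : Option String) : Prop := out = alphabet_finder_alt s
instance (s : String) (out : Option String) : Decidable (Spec_alphabet_finder s out) := by unfold Spec_alphabet_finder; infer_instance

-- ===== CLAIM (what is proved, stated in full; the proofs are below) =====
def Claim_equal_alphabet_finder : Prop := ∀ (s : String), Dom_alphabet_finder s → Spec_alphabet_finder s (alphabet_finder s)

-- ===== LEMMAS AND PROOFS =====

def pvFoc (t : List Char) (i : Nat) (c : Char) : Option Nat :=
  (PySem.List.index? (t.drop i) c).map (i + ·)

lemma pvFoc_self (t : List Char) (i : Nat) (h : i < t.length) : pvFoc t i (t[i]'h) = some i := by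
  unfold pvFoc
  rw [List.drop_eq_getElem_cons h, PySem.List.index?_cons_self]
  simp

lemma pvFoc_shift (t : List Char) (i : Nat) (c : Char) (h : i < t.length) (hne : t[i]'h ≠ c) :
    pvFoc t i c = pvFoc t (i + 1) c := by
  unfold pvFoc
  rw [List.drop_eq_getElem_cons h, PySem.List.index?_cons_of_ne _ hne]
  cases PySem.List.index? (t.drop (i+1)) c <;> simp <;> omega

lemma pvFoc_isSome (t : List Char) (i : Nat) (c : Char) : (pvFoc t i c).isSome ↔ c ∈ t.drop i := by
  unfold pvFoc
  rw [Option.isSome_map]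
  exact PySem.List.index?_isSome_iff _ _

lemma pvFoc_spec (t : List Char) (i : Nat) (c : Char) {j : Nat} (h : pvFoc t i c = some j) :
    i ≤ j ∧ ∃ (hj : j < t.length), t[j]'hj = c := by
  unfold pvFoc at h
  rcases Option.map_eq_some_iff.mp h with ⟨k, hk, rfl⟩
  obtain ⟨hkl, hget, -⟩ := PySem.List.getElem_of_index?_eq_some hk
  rw [List.getElem_drop] at hget
  have hlen : k < t.length - i := by simpa using hkl
  have : i + k < t.length := by omega
  exact ⟨by omega, this, hget⟩

def pvMA (t : List Char) (alpha : List Char) (i : Nat) : Nat :=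
  (alpha.map (fun l => (pvFoc t i l).getD 0 + 1)).foldl max 0

lemma pvMA_le (t : List Char) (alpha : List Char) (i : Nat) (l : Char) (hl : l ∈ alpha) :
    (pvFoc t i l).getD 0 + 1 ≤ pvMA t alpha i := by
  exact (PySem.List.le_foldl_max _ 0).2 _ (List.mem_map_of_mem hl)

lemma pvMA_mem (t : List Char) (alpha : List Char) (i : Nat) (h : alpha ≠ []) :
    ∃ l ∈ alpha, pvMA t alpha i = (pvFoc t i l).getD 0 + 1 := by
  rcases PySem.List.foldl_max_mem (alpha.map (fun l => (pvFoc t i l).getD 0 + 1)) 0 with h0 | hm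
  · exfalso
    rcases List.exists_mem_of_ne_nil alpha h with ⟨l, hl⟩
    have := pvMA_le t alpha i l hl
    unfold pvMA at this; omega
  · rcases List.mem_map.mp hm with ⟨l, hl, he⟩
    exact ⟨l, hl, he.symm⟩

lemma pvChar_eq_iff_toNat (c d : Char) : c = d ↔ c.toNat = d.toNat :=
  ⟨fun h => h ▸ rfl, fun h => Char.ext (UInt32.toNat_inj.mp h)⟩

lemma mem_pvLetters_iff (c : Char) : c ∈ pvLetters ↔ ('a' ≤ c ∧ c ≤ 'z') := by
  have h1 : ('a' ≤ c ∧ c ≤ 'z') ↔ (97 ≤ c.toNat ∧ c.toNat ≤ 122) := Iff.rfl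
  simp only [pvLetters, List.mem_cons, List.not_mem_nil, or_false, pvChar_eq_iff_toNat, h1,
    show ('a').toNat = 97 from rfl, show ('b').toNat = 98 from rfl, show ('c').toNat = 99 from rfl,
    show ('d').toNat = 100 from rfl, show ('e').toNat = 101 from rfl, show ('f').toNat = 102 from rfl,
    show ('g').toNat = 103 from rfl, show ('h').toNat = 104 from rfl, show ('i').toNat = 105 from rfl,
    show ('j').toNat = 106 from rfl, show ('k').toNat = 107 from rfl, show ('l').toNat = 108 from rfl,
    show ('m').toNat = 109 from rfl, show ('n').toNat = 110 from rfl, show ('o').toNat = 111 from rfl,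
    show ('p').toNat = 112 from rfl, show ('q').toNat = 113 from rfl, show ('r').toNat = 114 from rfl,
    show ('s').toNat = 115 from rfl, show ('t').toNat = 116 from rfl, show ('u').toNat = 117 from rfl,
    show ('v').toNat = 118 from rfl, show ('w').toNat = 119 from rfl, show ('x').toNat = 120 from rfl,
    show ('y').toNat = 121 from rfl, show ('z').toNat = 122 from rfl]
  omega

lemma pvMA_congr (t : List Char) (alpha : List Char) (i j : Nat)
    (h : ∀ l ∈ alpha, pvFoc t i l = pvFoc t j l) : pvMA t alpha i = pvMA t alpha j := by
  unfold pvMA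
  congr 1
  exact List.map_congr_left fun l hl => by rw [h l hl]

lemma pvFoc_ge (t : List Char) (i : Nat) (c : Char) (h : c ∈ t.drop i) :
    ∃ j, pvFoc t i c = some j ∧ i ≤ j := by
  have := (pvFoc_isSome t i c).mpr h
  rcases Option.isSome_iff_exists.mp this with ⟨j, hj⟩
  exact ⟨j, hj, (pvFoc_spec t i c hj).1⟩

lemma innerA_cov (t : List Char) : ∀ (k count : Nat) (alpha : List Char), t.length - count ≤ k →
    alpha ≠ [] → (∀ l ∈ alpha, l ∈ t.drop count) →
    pvInnerA t alpha count = ([], pvMA t alpha count) := by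
  intro k
  induction k with
  | zero =>
    intro count alpha hk hne hcov
    exfalso
    rcases List.exists_mem_of_ne_nil alpha hne with ⟨l, hl⟩
    have := hcov l hl
    rw [List.drop_eq_nil_of_le (by omega)] at this
    simp at this
  | succ k ih =>
    intro count alpha hk hne hcov
    have hcnt : count < t.length := by
      by_contra hge
      rcases List.exists_mem_of_ne_nil alpha hne with ⟨l, hl⟩
      have := hcov l hl
      rw [List.drop_eq_nil_of_le (by omega)] at this
      simp at this
    have hguard : 0 < alpha.length ∧ count < t.length :=
      ⟨List.length_pos_iff.mpr hne, hcnt⟩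
    rw [pvInnerA, dif_pos hguard]
    set c := t[count]'hcnt with hc
    have hdropc : t.drop count = c :: t.drop (count + 1) := List.drop_eq_getElem_cons hcnt
    by_cases hmem : c ∈ alpha
    · simp only [if_pos hmem]
      by_cases hnil : alpha.filter (fun x => x ≠ c) = []
      · have hall : ∀ x ∈ alpha, x = c := by
          intro x hx
          by_contra hxc
          have : x ∈ alpha.filter (fun x => x ≠ c) := List.mem_filter.mpr ⟨hx, by simp [hxc]⟩
          rw [hnil] at this
          simp at this
        rw [hnil, pvInnerA]
        simp only [List.length_nil]
        rw [dif_neg (by omega)]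
        have hMA : pvMA t alpha count = count + 1 := by
          rcases pvMA_mem t alpha count hne with ⟨l, hl, hM⟩
          rw [hall l hl] at hM
          rw [hM, pvFoc_self t count hcnt]
          rfl
        rw [hMA]
      · have hsub : ∀ l ∈ alpha.filter (fun x => x ≠ c), l ∈ alpha ∧ l ≠ c := by
          intro l hl
          rcases List.mem_filter.mp hl with ⟨h1, h2⟩
          exact ⟨h1, by simpa using h2⟩
        have hcov' : ∀ l ∈ alpha.filter (fun x => x ≠ c), l ∈ t.drop (count + 1) := by
          intro l hl
          rcases hsub l hl with ⟨h1, h2⟩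
          have := hcov l h1
          rw [hdropc] at this
          rcases List.mem_cons.mp this with h | h
          · exact absurd h h2
          · exact h
        rw [ih (count + 1) _ (by omega) hnil hcov']
        congr 1
        apply (Nat.le_antisymm ?_ ?_).symm
        · rcases pvMA_mem t alpha count hne with ⟨l, hl, hM⟩
          by_cases hlc : l = c
          · subst hlc
            rw [pvFoc_self t count hcnt] at hM
            rcases List.exists_mem_of_ne_nil _ hnil with ⟨l', hl'⟩
            rcases pvFoc_ge t (count + 1) l' (hcov' l' hl') with ⟨j, hj, hge⟩
            have h1 := pvMA_le t _ (count + 1) l' hl'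
            rw [hj] at h1
            simp only [Option.getD_some] at h1 hM
            omega
          · have hshift := pvFoc_shift t count l hcnt (by rw [← hc]; exact fun he => hlc he.symm)
            rw [hM, hshift]
            exact pvMA_le t _ (count + 1) l (List.mem_filter.mpr ⟨hl, by simp [hlc]⟩)
        · rcases pvMA_mem t _ (count + 1) hnil with ⟨l, hl, hM⟩
          rcases hsub l hl with ⟨h1, h2⟩
          have hshift := pvFoc_shift t count l hcnt (by rw [← hc]; exact fun he => h2 he.symm)
          rw [hM, ← hshift]
          exact pvMA_le t alpha count l h1
    · simp only [if_neg hmem]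
      have hcov' : ∀ l ∈ alpha, l ∈ t.drop (count + 1) := by
        intro l hl
        have := hcov l hl
        rw [hdropc] at this
        rcases List.mem_cons.mp this with h | h
        · exact absurd (h ▸ hl) hmem
        · exact h
      rw [ih (count + 1) alpha (by omega) hne hcov']
      congr 1
      apply (pvMA_congr t alpha count (count + 1) ?_).symm
      intro l hl
      exact pvFoc_shift t count l hcnt (by rw [← hc]; exact fun he => hmem (he ▸ hl))

lemma innerA_uncov (t : List Char) : ∀ (k count : Nat) (alpha : List Char), t.length - count ≤ k →
    (∃ l ∈ alpha, l ∉ t.drop count) → (pvInnerA t alpha count).1 ≠ [] := by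
  intro k
  induction k with
  | zero =>
    intro count alpha hk ⟨l, hl, _⟩
    rw [pvInnerA, dif_neg (by omega)]
    exact List.ne_nil_of_mem hl
  | succ k ih =>
    intro count alpha hk ⟨l, hl, hlnot⟩
    by_cases hguard : 0 < alpha.length ∧ count < t.length
    · rw [pvInnerA, dif_pos hguard]
      have hcnt := hguard.2
      have hdropc : t.drop count = t[count]'hcnt :: t.drop (count + 1) := List.drop_eq_getElem_cons hcnt
      have hlc : l ≠ t[count]'hcnt := by
        intro he
        exact hlnot (by rw [hdropc, he]; exact List.mem_cons_self)
      have hlnot' : l ∉ t.drop (count + 1) := by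
        intro hmem
        exact hlnot (by rw [hdropc]; exact List.mem_cons_of_mem _ hmem)
      apply ih (count + 1) _ (by omega)
      by_cases hmem : t[count]'hcnt ∈ alpha
      · exact ⟨l, by simp only [if_pos hmem]; exact List.mem_filter.mpr ⟨hl, by simp [hlc]⟩, hlnot'⟩
      · exact ⟨l, by simp only [if_neg hmem]; exact hl, hlnot'⟩
    · rw [pvInnerA, dif_neg hguard]
      exact List.ne_nil_of_mem hl

def pvCovB (t : List Char) (i : Nat) : Bool := pvLetters.all (fun l => decide (l ∈ t.drop i))

lemma pvCovB_iff (t : List Char) (i : Nat) : pvCovB t i = true ↔ ∀ l ∈ pvLetters, l ∈ t.drop i := by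
  simp [pvCovB]

lemma pvMA_bounds (t : List Char) (i : Nat) (h : pvCovB t i = true) :
    i < pvMA t pvLetters i ∧ pvMA t pvLetters i ≤ t.length := by
  have hcov := (pvCovB_iff t i).mp h
  constructor
  · rcases pvFoc_ge t i 'a' (hcov 'a' (by decide)) with ⟨j, hj, hge⟩
    have := pvMA_le t pvLetters i 'a' (by decide)
    rw [hj] at this
    simp only [Option.getD_some] at this
    omega
  · rcases pvMA_mem t pvLetters i (by decide) with ⟨l, hl, hM⟩
    rcases pvFoc_ge t i l (hcov l hl) with ⟨j, hj, _⟩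
    rcases pvFoc_spec t i l hj with ⟨-, hjlt, -⟩
    rw [hM, hj]
    simp only [Option.getD_some]
    omega

def pvInvD (t : List Char) (i : Nat) (d : PySem.Dict Char Int) : Prop :=
  d.keys.Nodup ∧ ∀ c : Char, d.get? c =
    (if 'a' ≤ c ∧ c ≤ 'z' then (pvFoc t i c).map (fun j => (j : Int)) else none)

lemma pvInvD_init (t : List Char) : pvInvD t t.length (PySem.Dict.empty) := by
  refine ⟨by simpa using PySem.Dict.nodup_keys_empty, fun c => ?_⟩
  rw [PySem.Dict.get?_empty]
  have : pvFoc t t.length c = none := by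
    unfold pvFoc
    rw [List.drop_length]
    rfl
  rw [this]
  simp

lemma pvInvD_step (t : List Char) (i : Nat) (hi : i < t.length) (d : PySem.Dict Char Int)
    (h : pvInvD t (i + 1) d) :
    pvInvD t i (if 'a' ≤ t[i]'hi ∧ t[i]'hi ≤ 'z' then d.insert (t[i]'hi) (i : Int) else d) := by
  obtain ⟨hnd, hget⟩ := h
  by_cases hlow : 'a' ≤ t[i]'hi ∧ t[i]'hi ≤ 'z'
  · rw [if_pos hlow]
    refine ⟨PySem.Dict.nodup_keys_insert d _ _ hnd, fun c => ?_⟩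
    rw [PySem.Dict.get?_insert]
    by_cases hc : c = t[i]'hi
    · subst hc
      rw [if_pos rfl, if_pos hlow, pvFoc_self t i hi]
      rfl
    · rw [if_neg hc, hget c, pvFoc_shift t i c hi (fun he => hc he.symm)]
  · rw [if_neg hlow]
    refine ⟨hnd, fun c => ?_⟩
    rw [hget c]
    by_cases hc : 'a' ≤ c ∧ c ≤ 'z'
    · rw [if_pos hc, if_pos hc,
        pvFoc_shift t i c hi (fun he => hlow (he ▸ hc))]
    · rw [if_neg hc, if_neg hc]

lemma pvInvD_keys (t : List Char) (i : Nat) (d : PySem.Dict Char Int) (h : pvInvD t i d) :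
    ∀ c : Char, c ∈ d.keys ↔ (c ∈ pvLetters ∧ c ∈ t.drop i) := by
  intro c
  have hg := h.2 c
  constructor
  · intro hk
    have hne : d.get? c ≠ none := fun he => ((PySem.Dict.get?_eq_none_iff_not_mem_keys d c).mp he) hk
    by_cases hc : 'a' ≤ c ∧ c ≤ 'z'
    · rw [if_pos hc] at hg
      refine ⟨(mem_pvLetters_iff c).mpr hc, ?_⟩
      rw [← pvFoc_isSome]
      rw [hg] at hne
      cases hfo : pvFoc t i c
      · rw [hfo] at hne; simp at hne
      · rfl
    · rw [if_neg hc] at hg; exact absurd hg hne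
  · intro ⟨hl, hmem⟩
    have hc := (mem_pvLetters_iff c).mp hl
    rw [if_pos hc] at hg
    rcases pvFoc_ge t i c hmem with ⟨j, hj, -⟩
    rw [hj] at hg
    by_contra hnk
    have : d.get? c = none := (PySem.Dict.get?_eq_none_iff_not_mem_keys d c).mpr hnk
    rw [this] at hg
    simp at hg

lemma pvLetters_nodup : pvLetters.Nodup := by decide

lemma pvInvD_size (t : List Char) (i : Nat) (d : PySem.Dict Char Int) (h : pvInvD t i d) :
    (d.size = 26 ↔ pvCovB t i = true) := by
  have hkeys := pvInvD_keys t i d h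
  have hnd := h.1
  have hsize : d.size = d.keys.length := by
    simp [PySem.Dict.size, PySem.Dict.keys]
  rw [hsize, pvCovB_iff]
  constructor
  · intro hlen l hl
    have hsub : d.keys ⊆ pvLetters := fun c hc => ((hkeys c).mp hc).1
    have : pvLetters ⊆ d.keys := by
      have hperm : d.keys.toFinset = pvLetters.toFinset := by
        apply Finset.eq_of_subset_of_card_le
        · intro x hx
          simp only [List.mem_toFinset] at hx ⊢
          exact hsub hx
        · rw [List.toFinset_card_of_nodup hnd, List.toFinset_card_of_nodup pvLetters_nodup]
          rw [hlen]
          decide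
      intro x hx
      have : x ∈ d.keys.toFinset := by rw [hperm]; simpa using hx
      simpa using this
    exact ((hkeys l).mp (this hl)).2
  · intro hcov
    have heq : ∀ c, c ∈ d.keys ↔ c ∈ pvLetters := by
      intro c
      rw [hkeys c]
      exact ⟨fun ⟨a, _⟩ => a, fun hc => ⟨hc, hcov c hc⟩⟩
    have hperm : d.keys.Perm pvLetters := (List.perm_ext_iff_of_nodup hnd pvLetters_nodup).mpr heq
    rw [hperm.length_eq]
    rfl

lemma pvInvD_perm (t : List Char) (i : Nat) (d : PySem.Dict Char Int) (h : pvInvD t i d)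
    (hcov : pvCovB t i = true) : ∀ c, c ∈ d.keys ↔ c ∈ pvLetters := by
  intro c
  rw [pvInvD_keys t i d h c]
  exact ⟨fun ⟨a, _⟩ => a, fun hc => ⟨hc, (pvCovB_iff t i).mp hcov c hc⟩⟩

lemma pvInvD_max (t : List Char) (i : Nat) (d : PySem.Dict Char Int) (h : pvInvD t i d)
    (hc : pvCovB t i = true) :
    PySem.List.max? d.values (fun v => v) = some ((pvMA t pvLetters i : Int) - 1) := by
  have hvals := PySem.Dict.values_eq_map_keys d h.1 0
  have hmemk : ('a' : Char) ∈ d.keys := (pvInvD_perm t i d h hc 'a').mpr (by decide)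
  have hvne : d.values ≠ [] := by
    rw [hvals]
    intro he
    exact (List.ne_nil_of_mem hmemk) (List.map_eq_nil_iff.mp he)
  cases hmax : PySem.List.max? d.values (fun v => v) with
  | none => exact absurd ((PySem.List.max?_eq_none_iff _ _).mp hmax) hvne
  | some m =>
    refine congrArg some ?_
    have hub : ∀ v ∈ d.values, v ≤ (pvMA t pvLetters i : Int) - 1 := by
      intro v hv
      rw [hvals] at hv
      rcases List.mem_map.mp hv with ⟨k, hk, hvk⟩
      have hkk := (pvInvD_keys t i d h k).mp hk
      have hget := h.2 k
      rw [if_pos ((mem_pvLetters_iff k).mp hkk.1)] at hget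
      rcases pvFoc_ge t i k hkk.2 with ⟨j, hj, -⟩
      rw [hj] at hget
      have : d.getD k 0 = (j : Int) := by
        rw [PySem.Dict.getD_eq_get?_getD, hget]; rfl
      have hle := pvMA_le t pvLetters i k hkk.1
      rw [hj] at hle
      simp only [Option.getD_some] at hle
      rw [← hvk, this]
      omega
    have hmem : ((pvMA t pvLetters i : Int) - 1) ∈ d.values := by
      rcases pvMA_mem t pvLetters i (by decide) with ⟨l, hl, hM⟩
      rcases pvFoc_ge t i l ((pvCovB_iff t i).mp hc l hl) with ⟨j, hj, -⟩
      rw [hj] at hM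
      simp only [Option.getD_some] at hM
      have hlk : l ∈ d.keys := (pvInvD_perm t i d h hc l).mpr hl
      have hget := h.2 l
      rw [if_pos ((mem_pvLetters_iff l).mp hl), hj] at hget
      have hgd : d.getD l 0 = (j : Int) := by
        rw [PySem.Dict.getD_eq_get?_getD, hget]; rfl
      have : ((pvMA t pvLetters i : Int) - 1) = d.getD l 0 := by
        rw [hgd, hM]; push_cast; ring
      rw [this, hvals]
      exact List.mem_map_of_mem hlk
    have h1 := PySem.List.max?_isMax hmax _ hmem
    have h2 := hub m (PySem.List.max?_mem hmax)
    omega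

def pvBest (t : List Char) (i : Nat) : Option (Int × Int) :=
  if i < t.length then
    (let b := pvBest t (i + 1)
     if pvCovB t i then
       (let cand : Int × Int := ((pvMA t pvLetters i : Int) - i, (i : Int))
        match b with
        | none => some cand
        | some p => if cand.1 < p.1 ∨ (cand.1 = p.1 ∧ cand.2 < p.2) then some cand else some p)
     else b)
  else none
termination_by t.length - i

lemma pvStepB_spec (t : List Char) (i : Nat) (hi : i < t.length)
    (st : PySem.Dict Char Int × Option (Int × Int))
    (h1 : pvInvD t (i + 1) st.1) (h2 : st.2 = pvBest t (i + 1)) :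
    pvInvD t i (pvStepB t st (i : Int)).1 ∧ (pvStepB t st (i : Int)).2 = pvBest t i := by
  have hgetc : PySem.List.pyGetD t (i : Int) ' ' = t[i]'hi := by
    rw [PySem.List.pyGetD_eq_getElem t ' ' (by omega) (by exact_mod_cast hi)]
    simp
  have hd' := pvInvD_step t i hi st.1 h1
  constructor
  · simp only [pvStepB, hgetc]
    exact hd'
  · simp only [pvStepB, hgetc]
    rw [pvBest]
    rw [if_pos hi]
    set d' := if 'a' ≤ t[i]'hi ∧ t[i]'hi ≤ 'z' then st.1.insert (t[i]'hi) (i : Int) else st.1 with hd'def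
    by_cases hcov : pvCovB t i = true
    · rw [if_pos hcov]
      rw [if_pos ((pvInvD_size t i d' hd').mpr hcov)]
      rw [pvInvD_max t i d' hd' hcov]
      have harith : (pvMA t pvLetters i : Int) - 1 + 1 - (i : Int) = (pvMA t pvLetters i : Int) - i := by ring
      rw [h2]
      simp only [harith]
    · rw [if_neg (fun hs => hcov ((pvInvD_size t i d' hd').mp hs))]
      rw [if_neg hcov]
      exact h2

lemma pvB_run (t : List Char) : ∀ (j : Nat), j < t.length →
    ∀ (st : PySem.Dict Char Int × Option (Int × Int)), pvInvD t (j + 1) st.1 → st.2 = pvBest t (j + 1) →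
    ((PySem.List.pyRange (j : Int) (-1) (-1)).foldl (pvStepB t) st).2 = pvBest t 0 := by
  intro j
  induction j with
  | zero =>
    intro hj st h1 h2
    rw [PySem.List.pyRange_neg_one_cons (by omega)]
    rw [show (((0 : Nat) : Int) - 1) = (-1 : Int) by norm_num,
      PySem.List.pyRange_neg_one_eq_nil (by norm_num)]
    simp only [List.foldl_cons, List.foldl_nil]
    exact_mod_cast (pvStepB_spec t 0 hj st h1 h2).2
  | succ j ih =>
    intro hj st h1 h2
    rw [PySem.List.pyRange_neg_one_cons (by omega)]
    simp only [List.foldl_cons]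
    have hstep := pvStepB_spec t (j + 1) hj st h1 h2
    rw [show (((j + 1 : Nat) : Int) - 1) = (j : Int) by push_cast; ring]
    have hcast : (((j + 1 : Nat)) : Int) = ((j : Int) + 1) := by push_cast; ring
    rw [hcast] at hstep
    exact ih (by omega) _ hstep.1 hstep.2

def pvLexLt (p q : Int × Int) : Prop := p.1 < q.1 ∨ (p.1 = q.1 ∧ p.2 < q.2)

def pvCand (t : List Char) (j : Nat) : Int × Int := ((pvMA t pvLetters j : Int) - j, (j : Int))

lemma pvBest_none (t : List Char) : ∀ (k i : Nat), t.length - i ≤ k → pvBest t i = none →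
    ∀ j, i ≤ j → j < t.length → pvCovB t j = false := by
  intro k
  induction k with
  | zero =>
    intro i hk h j hij hj
    omega
  | succ k ih =>
    intro i hk h j hij hj
    by_cases hi : i < t.length
    · rw [pvBest, if_pos hi] at h
      by_cases hcov : pvCovB t i = true
      · rw [if_pos hcov] at h
        exfalso
        cases hb : pvBest t (i + 1) with
        | none => rw [hb] at h; dsimp only at h; exact Option.some_ne_none _ h
        | some q =>
          rw [hb] at h
          dsimp only at h
          split at h
          · exact Option.some_ne_none _ h
          · exact Option.some_ne_none _ h
      · rw [if_neg hcov] at h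
        rcases Nat.eq_or_lt_of_le hij with rfl | hlt
        · exact Bool.eq_false_iff.mpr hcov
        · exact ih (i + 1) (by omega) h j hlt hj
    · omega

lemma pvBest_some (t : List Char) : ∀ (k i : Nat) (p : Int × Int), t.length - i ≤ k →
    pvBest t i = some p →
    ∃ j, i ≤ j ∧ j < t.length ∧ pvCovB t j = true ∧ p = pvCand t j ∧
      ∀ j', i ≤ j' → j' < t.length → pvCovB t j' = true → j' ≠ j → pvLexLt p (pvCand t j') := by
  intro k
  induction k with
  | zero =>
    intro i p hk h
    rw [pvBest, if_neg (by omega)] at h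
    exact absurd h.symm (Option.some_ne_none p)
  | succ k ih =>
    intro i p hk h
    by_cases hi : i < t.length
    · rw [pvBest, if_pos hi] at h
      by_cases hcov : pvCovB t i = true
      · rw [if_pos hcov] at h
        cases hb : pvBest t (i + 1) with
        | none =>
          rw [hb] at h
          dsimp only at h
          simp only [Option.some_inj] at h
          refine ⟨i, le_refl i, hi, hcov, h.symm, ?_⟩
          intro j' hij' hj' hcov' hne
          have hij1 : i + 1 ≤ j' := by
            rcases Nat.eq_or_lt_of_le hij' with rfl | hlt
            · exact absurd rfl hne
            · omega
          have := pvBest_none t (t.length - (i+1)) (i + 1) (by omega) hb j' hij1 hj'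
          rw [hcov'] at this
          exact Bool.noConfusion this
        | some q =>
          rw [hb] at h
          dsimp only at h
          split at h
          next hlt =>
            simp only [Option.some_inj] at h
            rcases ih (i + 1) q (by omega) hb with ⟨j, hij, hjlt, hjcov, hq, hmin⟩
            refine ⟨i, le_refl i, hi, hcov, h.symm, ?_⟩
            intro j' hij' hj' hcov' hne
            subst hq
            by_cases hj'j : j' = j
            · subst hj'j
              rw [← h]
              simp only [pvLexLt, pvCand] at hlt ⊢
              omega
            · have hij1 : i + 1 ≤ j' := by
                rcases Nat.eq_or_lt_of_le hij' with rfl | h2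
                · exact absurd rfl hne
                · omega
              have h3 := hmin j' hij1 hj' hcov' hj'j
              rw [← h]
              simp only [pvLexLt, pvCand] at hlt h3 ⊢
              omega
          next hlt =>
            simp only [Option.some_inj] at h
            rcases ih (i + 1) q (by omega) hb with ⟨j, hij, hjlt, hjcov, hq, hmin⟩
            subst hq
            refine ⟨j, by omega, hjlt, hjcov, h.symm, ?_⟩
            intro j' hij' hj' hcov' hne
            rw [← h]
            by_cases hj'i : j' = i
            · subst hj'i
              simp only [pvLexLt, pvCand] at hlt ⊢
              have : j' < j := by omega
              omega
            · have hij1 : i + 1 ≤ j' := by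
                rcases Nat.eq_or_lt_of_le hij' with rfl | h2
                · exact absurd rfl hj'i
                · omega
              exact hmin j' hij1 hj' hcov' hne
      · rw [if_neg hcov] at h
        rcases ih (i + 1) p (by omega) h with ⟨j, hij, hjlt, hjcov, hq, hmin⟩
        refine ⟨j, by omega, hjlt, hjcov, hq, ?_⟩
        intro j' hij' hj' hcov' hne
        by_cases hj'i : j' = i
        · subst hj'i
          rw [hcov'] at hcov
          exact absurd rfl hcov
        · exact hmin j' (by omega) hj' hcov' hne
    · rw [pvBest, if_neg hi] at h
      exact absurd h.symm (Option.some_ne_none p)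

lemma pvLower_length (cs : List Char) : (PySem.Chars.lower cs).length = cs.length := by
  simp [PySem.Chars.lower]

-- A's outer loop produces exactly the covered starts, in increasing order
lemma pvStrsA_eq (cs : List Char) :
    (PySem.List.pyRange 0 (cs.length : Int) 1).foldl
        (fun (acc : List (List Char)) i =>
          let r := pvInnerA (PySem.Chars.lower cs) pvLetters i.toNat
          if r.1.length = 0 then acc ++ [PySem.List.slice cs (some i) (some (r.2 : Int))] else acc) []
    = ((List.range (PySem.Chars.lower cs).length).filter (fun k => pvCovB (PySem.Chars.lower cs) k)).map
        (fun (k : Nat) => PySem.List.slice cs (some (k : Int))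
          (some ((pvMA (PySem.Chars.lower cs) pvLetters k : Nat) : Int))) := by
  set t := PySem.Chars.lower cs with htdef
  have ht : t.length = cs.length := pvLower_length cs
  rw [ht]
  have hfun : (fun (acc : List (List Char)) (i : Int) =>
          let r := pvInnerA t pvLetters i.toNat
          if r.1.length = 0 then acc ++ [PySem.List.slice cs (some i) (some (r.2 : Int))] else acc)
      = (fun (acc : List (List Char)) (i : Int) =>
          if (fun i : Int => decide ((pvInnerA t pvLetters i.toNat).1.length = 0)) i = true
          then acc ++ [(fun i : Int => PySem.List.slice cs (some i)
            (some ((pvInnerA t pvLetters i.toNat).2 : Int))) i] else acc) := by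
    funext acc i
    by_cases h : (pvInnerA t pvLetters i.toNat).1.length = 0 <;> simp [h]
  rw [hfun, PySem.List.foldl_append_if, List.nil_append]
  have hr : PySem.List.pyRange 0 (cs.length : Int) 1 = List.map (fun (k : Nat) => (k : Int)) (List.range cs.length) := by
    rw [PySem.List.pyRange_one]
    have h0 : ((cs.length : Int) - 0).toNat = cs.length := by simp
    rw [h0]
    apply List.map_congr_left
    intro k _
    simp
  rw [hr, List.filter_map, List.map_map]
  have hcond : ∀ k ∈ List.range cs.length,
      ((fun i : Int => decide ((pvInnerA t pvLetters i.toNat).1.length = 0)) ∘ (fun k : Nat => (k : Int))) k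
      = pvCovB t k := by
    intro k hk
    have hkn : k < t.length := by rw [ht]; exact List.mem_range.mp hk
    simp only [Function.comp_apply, Int.toNat_natCast]
    by_cases hc : pvCovB t k = true
    · simp only [innerA_cov t (t.length - k) k pvLetters (le_refl _) (by decide) ((pvCovB_iff t k).mp hc)]
      simp [hc]
    · have hex : ∃ l ∈ pvLetters, l ∉ t.drop k := by
        by_contra hno
        push_neg at hno
        exact hc ((pvCovB_iff t k).mpr hno)
      have hne := innerA_uncov t (t.length - k) k pvLetters (le_refl _) hex
      have hF : pvCovB t k = false := Bool.eq_false_iff.mpr hc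
      rw [hF]
      apply decide_eq_false
      intro hlen
      exact hne (List.length_eq_zero_iff.mp hlen)
  rw [List.filter_congr hcond]
  apply List.map_congr_left
  intro k hk
  have hkmem := List.mem_filter.mp hk
  have hkn : k < t.length := by rw [ht]; exact List.mem_range.mp hkmem.1
  have hcov : pvCovB t k = true := by simpa using hkmem.2
  simp only [Function.comp_apply, Int.toNat_natCast]
  simp only [innerA_cov t (t.length - k) k pvLetters (le_refl _) (by decide) ((pvCovB_iff t k).mp hcov)]

-- selection scan: first index with minimal length
lemma pvSel_aux (L : List (List Char)) (h0 : 0 < L.length) : ∀ (k : Nat), 1 ≤ k → k ≤ L.length →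
    (let r := (PySem.List.pyRange 0 (k : Int) 1).foldl
        (fun (p : Nat × Nat) i =>
          if (PySem.List.pyGetD L i []).length < p.2 then (i.toNat, (PySem.List.pyGetD L i []).length) else p)
        (0, (PySem.List.pyGetD L 0 []).length);
     r.1 < k ∧ r.2 = (L.getD r.1 []).length ∧ (∀ j, j < k → r.2 ≤ (L.getD j []).length) ∧
       (∀ j, j < r.1 → r.2 < (L.getD j []).length)) := by
  intro k
  induction k with
  | zero => intro h1 _; omega
  | succ k ih =>
    intro h1 hk
    by_cases hk1 : k = 0
    · subst hk1
      have hone : PySem.List.pyRange 0 ((1 : Nat) : Int) 1 = [0] := by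
        rw [show (((1:Nat)):Int) = (0 : Int) + 1 from by norm_num]
        exact PySem.List.pyRange_one_singleton 0
      rw [hone]
      simp only [List.foldl_cons, List.foldl_nil]
      rw [if_neg (by omega)]
      rw [PySem.List.pyGetD_zero]
      refine ⟨Nat.zero_lt_one, rfl, ?_, ?_⟩
      · intro j hj
        interval_cases j
        exact le_refl _
      · intro j hj
        exact absurd hj (Nat.not_lt_zero j)
    · have hk' : 1 ≤ k := by omega
      have hstep := ih hk' (by omega)
      rw [show ((k + 1 : Nat) : Int) = ((k : Nat) : Int) + 1 from by push_cast; ring,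
        PySem.List.pyRange_one_succ_right (by positivity), List.foldl_append]
      simp only [List.foldl_cons, List.foldl_nil]
      set r := (PySem.List.pyRange 0 ((k : Nat) : Int) 1).foldl
        (fun (p : Nat × Nat) i =>
          if (PySem.List.pyGetD L i []).length < p.2 then (i.toNat, (PySem.List.pyGetD L i []).length) else p)
        (0, (PySem.List.pyGetD L 0 []).length) with hrdef
      obtain ⟨hA, hB, hC, hD⟩ := hstep
      have hpg : PySem.List.pyGetD L ((k : Nat) : Int) [] = L.getD k [] := by
        simp
      by_cases hlt : (PySem.List.pyGetD L ((k : Nat) : Int) []).length < r.2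
      · rw [if_pos hlt]
        rw [hpg] at hlt
        simp only [Int.toNat_natCast, hpg]
        refine ⟨by omega, by trivial, ?_, ?_⟩
        · intro j hj
          rcases Nat.lt_succ_iff_lt_or_eq.mp hj with hjk | rfl
          · have := hC j hjk
            omega
          · exact le_refl _
        · intro j hj
          have := hC j (by omega)
          omega
      · rw [if_neg hlt]
        rw [hpg] at hlt
        refine ⟨by omega, hB, ?_, hD⟩
        intro j hj
        rcases Nat.lt_succ_iff_lt_or_eq.mp hj with hjk | rfl
        · exact hC j hjk
        · omega


lemma pvBest_len (t : List Char) : pvBest t t.length = none := by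
  rw [pvBest]
  simp

lemma pvF_len (cs : List Char) (k : Nat) (hk : k < (PySem.Chars.lower cs).length)
    (hcov : pvCovB (PySem.Chars.lower cs) k = true) :
    (PySem.List.slice cs (some (k : Int))
      (some ((pvMA (PySem.Chars.lower cs) pvLetters k : Nat) : Int))).length
    = pvMA (PySem.Chars.lower cs) pvLetters k - k := by
  have hb := pvMA_bounds (PySem.Chars.lower cs) k hcov
  have ht := pvLower_length cs
  rw [PySem.List.slice_natCast, List.length_take, List.length_drop]
  omega

lemma pvSel (L : List (List Char)) (h0 : 0 < L.length) :
    (let r := (PySem.List.pyRange 0 (L.length : Int) 1).foldl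
        (fun (p : Nat × Nat) i =>
          if (PySem.List.pyGetD L i []).length < p.2 then (i.toNat, (PySem.List.pyGetD L i []).length) else p)
        (0, (PySem.List.pyGetD L 0 []).length);
     r.1 < L.length ∧ r.2 = (L.getD r.1 []).length ∧ (∀ j, j < L.length → r.2 ≤ (L.getD j []).length) ∧
       (∀ j, j < r.1 → r.2 < (L.getD j []).length)) :=
  pvSel_aux L h0 L.length h0 (le_refl _)

-- ===== VERDICT (by name: the statement is the Claim_ definition above) =====
set_option maxHeartbeats 2000000 in
theorem alphabet_finder_spec : Claim_equal_alphabet_finder := by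
  intro s _
  unfold Spec_alphabet_finder alphabet_finder alphabet_finder_alt
  dsimp only
  by_cases hemp : s.toList.length = 0
  · rw [if_pos hemp, if_pos hemp]
  · rw [if_neg hemp, if_neg hemp]
    set cs := s.toList with hcsdef
    set t := PySem.Chars.lower cs with htdef
    have ht : t.length = cs.length := pvLower_length cs
    have hn1 : 1 ≤ t.length := by omega
    have hinit : pvInvD t ((t.length - 1) + 1) ((PySem.Dict.empty : PySem.Dict Char Int), (none : Option (Int × Int))).1 := by
      rw [Nat.sub_add_cancel hn1]
      exact pvInvD_init t
    have hinit2 : ((PySem.Dict.empty : PySem.Dict Char Int), (none : Option (Int × Int))).2 = pvBest t ((t.length - 1) + 1) := by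
      rw [Nat.sub_add_cancel hn1, pvBest_len]
    have hBfold := pvB_run t (t.length - 1) (by omega) ((PySem.Dict.empty : PySem.Dict Char Int), (none : Option (Int × Int))) hinit hinit2
    rw [show (t.length : Int) - 1 = ((t.length - 1 : Nat) : Int) from by omega]
    rw [pvStrsA_eq cs, ← htdef, hBfold]
    set ACn := (List.range t.length).filter (fun k => pvCovB t k) with hACdef
    set F := (fun (k : Nat) => PySem.List.slice cs (some (k : Int))
      (some ((pvMA t pvLetters k : Nat) : Int))) with hFdef
    by_cases hAC : ACn = []
    · rw [if_pos (by rw [hAC]; rfl)]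
      have hnone : pvBest t 0 = none := by
        cases hbp : pvBest t 0 with
        | none => rfl
        | some p =>
          exfalso
          obtain ⟨j, -, hjlt, hjcov, -, -⟩ := pvBest_some t t.length 0 p (by omega) hbp
          have : j ∈ ACn := List.mem_filter.mpr ⟨List.mem_range.mpr hjlt, by simpa using hjcov⟩
          rw [hAC] at this
          simp at this
      rw [hnone]
    · have hlpos : 0 < (ACn.map F).length := by
        simp only [List.length_map]
        exact List.length_pos_iff.mpr hAC
      rw [if_neg (by omega)]
      obtain ⟨hA, hB, hC, hD⟩ := pvSel (ACn.map F) hlpos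
      -- facts about ACn members
      have hACmem : ∀ (idx : Nat) (h : idx < ACn.length),
          ACn[idx]'h < t.length ∧ pvCovB t (ACn[idx]'h) = true := by
        intro idx h
        have hm := List.getElem_mem h
        rcases List.mem_filter.mp hm with ⟨h1, h2⟩
        exact ⟨List.mem_range.mp h1, by simpa using h2⟩
      have hlen : ∀ (idx : Nat) (h : idx < ACn.length),
          ((ACn.map F).getD idx []).length = pvMA t pvLetters (ACn[idx]'h) - (ACn[idx]'h) := by
        intro idx h
        rw [List.getD_eq_getElem _ _ (by simpa using h), List.getElem_map]
        rw [hFdef]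
        exact pvF_len cs _ (by rw [← htdef]; exact (hACmem idx h).1) (by rw [← htdef]; exact (hACmem idx h).2)
      cases hbp : pvBest t 0 with
      | none =>
        exfalso
        rcases List.exists_mem_of_ne_nil ACn hAC with ⟨j0, hj0⟩
        rcases List.mem_filter.mp hj0 with ⟨hj0r, hj0c⟩
        have := pvBest_none t t.length 0 (by omega) hbp j0 (by omega) (List.mem_range.mp hj0r)
        rw [this] at hj0c
        simp at hj0c
      | some p =>
        obtain ⟨j, -, hjlt, hjcov, hpc, hmin⟩ := pvBest_some t t.length 0 p (by omega) hbp
        dsimp only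
        have hm : ((PySem.List.pyRange 0 (((ACn.map F).length : Nat) : Int) 1).foldl
            (fun (p : Nat × Nat) i =>
              if (PySem.List.pyGetD (ACn.map F) i []).length < p.2
              then (i.toNat, (PySem.List.pyGetD (ACn.map F) i []).length) else p)
            (0, (PySem.List.pyGetD (ACn.map F) 0 []).length)).1 < ACn.length := by
          simpa using hA
        set m := ((PySem.List.pyRange 0 (((ACn.map F).length : Nat) : Int) 1).foldl
            (fun (p : Nat × Nat) i =>
              if (PySem.List.pyGetD (ACn.map F) i []).length < p.2
              then (i.toNat, (PySem.List.pyGetD (ACn.map F) i []).length) else p)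
            (0, (PySem.List.pyGetD (ACn.map F) 0 []).length)).1 with hmdef
        -- the chosen start is exactly j
        have hje : ACn[m]'hm = j := by
          by_contra him
          have hlex := hmin (ACn[m]'hm) (by omega) (hACmem m hm).1 (hACmem m hm).2 him
          rw [hpc] at hlex
          simp only [pvLexLt, pvCand] at hlex
          have hbim := pvMA_bounds t (ACn[m]'hm) (hACmem m hm).2
          have hbj := pvMA_bounds t j hjcov
          have hLm := hlen m hm
          rw [← hB] at hLm
          have hjmem : j ∈ ACn := List.mem_filter.mpr ⟨List.mem_range.mpr hjlt, by simpa using hjcov⟩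
          obtain ⟨kj, hkjlt, hkjeq⟩ := List.mem_iff_getElem.mp hjmem
          have hLj := hC kj (by simpa using hkjlt)
          rw [hlen kj hkjlt, hkjeq] at hLj
          rw [hLm] at hLj
          -- from the lex-minimality: j's window is no longer, and j < chosen start
          have hji : j < ACn[m]'hm := by omega
          have hpw : ACn.Pairwise (· < ·) := List.Pairwise.filter _ (List.pairwise_lt_range)
          have hkjm : kj < m := by
            rcases lt_trichotomy kj m with hlt | heq | hgt
            · exact hlt
            · exfalso
              subst heq
              exact him hkjeq
            · exfalso
              have := (List.pairwise_iff_getElem.mp hpw) m kj hm hkjlt hgt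
              rw [hkjeq] at this
              omega
          have hDk := hD kj hkjm
          rw [hlen kj hkjlt, hkjeq, hLm] at hDk
          omega
        -- outputs agree
        simp only [PySem.List.pyGetD_natCast]
        rw [List.getD_eq_getElem _ _ (by simpa using hm), List.getElem_map, hje, hpc]
        dsimp only [pvCand]
        have harg : (j : Int) + ((pvMA t pvLetters j : Int) - (j : Int))
            = ((pvMA t pvLetters j : Nat) : Int) := by ring
        rw [harg, hFdef]
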